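-- pv_equiv track=rewrite | github.com/neizod/problems | codejam/15/1b/b-noisy-neighbors.py | unhappiness
-- ===== SOURCE A (Python) =====
-- def unhappiness(n, info):
--     unhappy_point = 0
--     for weight, avail in enumerate(info):
--         unhappy_point += weight * min(n, avail)
--         n -= min(n, avail)
--         if n == 0:
--             break
--     return unhappy_point
-- ===== SOURCE B (Python) =====
-- # Prefix-sum table + cutoff computation instead of A's mutate-remaining greedy loop.
-- def _prefixes(c, info):
--     # prefix sums table: [c, c+a0, c+a0+a1, ...]
--     out = [c]
--     for a in info:
--         c += a
--         out.append(c)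
--     return out
--
-- def _wsum(w, info):
--     # sum of weight*avail, weight counting up from w
--     total = 0
--     for a in info:
--         total += w * a
--         w += 1
--     return total
--
-- def _cutoff(n, prefix):
--     # first index k with prefix[k] >= n (len(prefix) if none)
--     k = 0
--     while k < len(prefix) and prefix[k] < n:
--         k += 1
--     return k
--
-- def unhappiness(n, info):
--     prefix = _prefixes(0, info)
--     # first t >= 1 with prefix[t] >= n marks the boundary bucket t-1
--     t = 1 + _cutoff(n, prefix[1:])
--     if t == len(prefix):
--         # demand never met: every bucket fully allocated
--         return _wsum(0, info)
--     # buckets before t-1 are full, bucket t-1 gets the remainder, the rest get nothing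
--     return _wsum(0, info[:t - 1]) + (t - 1) * (n - prefix[t - 1])
-- ===== Notes on version B (the rewrite author's own statement) =====
-- stated objective: alternative
-- what changed: A's greedy loop that mutates the remaining demand with min() and breaks early is replaced by a prefix-sum table plus a cutoff-index computation: full buckets before the cutoff index, one partial bucket at it, nothing after, full weighted sum if the demand is never met.
import Mathlib
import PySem

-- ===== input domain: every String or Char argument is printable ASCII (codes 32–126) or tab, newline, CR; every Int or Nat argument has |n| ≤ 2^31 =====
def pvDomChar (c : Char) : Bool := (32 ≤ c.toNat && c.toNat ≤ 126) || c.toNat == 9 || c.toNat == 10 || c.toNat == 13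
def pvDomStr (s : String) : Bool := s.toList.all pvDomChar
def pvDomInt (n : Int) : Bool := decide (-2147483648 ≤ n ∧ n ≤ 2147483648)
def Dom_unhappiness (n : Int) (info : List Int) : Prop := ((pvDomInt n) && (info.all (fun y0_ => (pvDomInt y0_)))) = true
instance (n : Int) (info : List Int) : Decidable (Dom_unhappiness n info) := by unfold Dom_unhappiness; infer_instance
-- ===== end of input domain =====

-- B replaces A's mutate-remaining greedy loop by a prefix-sum table with a cutoff index (alternative decomposition, same cost).


-- ===== PORT A =====
-- A's loop: running weight, remaining n, accumulator; break when remaining hits 0.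
def pvGoA (w n acc : Int) : List Int → Int
  | [] => acc
  | a :: r =>
    let m := min n a
    let acc' := acc + w * m
    let n' := n - m
    if n' = 0 then acc' else pvGoA (w + 1) n' acc' r

def unhappiness (n : Int) (info : List Int) : Int := pvGoA 0 n 0 info

-- ===== PORT B =====
-- Source B _prefixes(c, info): running-sum loop building [c, c+a0, c+a0+a1, ...]
def pvPrefixes (c : Int) : List Int → List Int
  | [] => [c]
  | a :: r => c :: pvPrefixes (c + a) r

-- Source B _wsum(w, info): sum of weight*avail, weight counting up from w
def pvWsum (w : Int) : List Int → Int
  | [] => 0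
  | a :: r => w * a + pvWsum (w + 1) r

-- Source B _cutoff(n, prefix): first index k with prefix[k] >= n (length if none)
def pvCutoff (n : Int) : List Int → Nat
  | [] => 0
  | p :: r => if p < n then pvCutoff n r + 1 else 0

-- prefix[1:] is .tail; info[:t-1] with t ≥ 1 is exactly take (t-1), and prefix[t-1] with
-- 1 ≤ t < len(prefix) is exactly getD (t-1) (always in range by pvCutoff_le_length below)
def unhappiness_alt (n : Int) (info : List Int) : Int :=
  let pre := pvPrefixes 0 info
  let t := 1 + pvCutoff n pre.tail
  if t = pre.length then pvWsum 0 info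
  else pvWsum 0 (info.take (t - 1)) + ((t : Int) - 1) * (n - pre.getD (t - 1) 0)

-- ===== PRECONDITION & SPEC =====
def Spec_unhappiness (n : Int) (info : List Int) (out : Int) : Prop := out = unhappiness_alt n info
instance (n : Int) (info : List Int) (out : Int) : Decidable (Spec_unhappiness n info out) := by unfold Spec_unhappiness; infer_instance

-- ===== CLAIM (what is proved, stated in full; the proofs are below) =====
def Claim_equal_unhappiness : Prop := ∀ (n : Int) (info : List Int), Dom_unhappiness n info → Spec_unhappiness n info (unhappiness n info)

-- ===== LEMMAS AND PROOFS =====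

-- B's computation generalized to an arbitrary starting weight w (let-free for rewriting).
def pvAltG (w n : Int) (info : List Int) : Int :=
  if 1 + pvCutoff n (pvPrefixes 0 info).tail = (pvPrefixes 0 info).length then pvWsum w info
  else pvWsum w (info.take (1 + pvCutoff n (pvPrefixes 0 info).tail - 1)) +
    (w + (1 + pvCutoff n (pvPrefixes 0 info).tail : Int) - 1) *
      (n - (pvPrefixes 0 info).getD (1 + pvCutoff n (pvPrefixes 0 info).tail - 1) 0)

theorem pvPrefixes_length (l : List Int) : ∀ c : Int, (pvPrefixes c l).length = l.length + 1 := by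
  induction l with
  | nil => intro c; simp [pvPrefixes]
  | cons a r ih => intro c; simp [pvPrefixes, ih (c + a)]

theorem pvPrefixes_shift (c : Int) (l : List Int) :
    ∀ d : Int, pvPrefixes (c + d) l = (pvPrefixes d l).map (fun p => c + p) := by
  induction l with
  | nil => intro d; simp [pvPrefixes]
  | cons a r ih =>
    intro d
    rw [pvPrefixes, pvPrefixes, List.map_cons]
    rw [show c + d + a = c + (d + a) by ring, ih (d + a)]

theorem pvPrefixes_shift0 (c : Int) (l : List Int) :
    pvPrefixes c l = (pvPrefixes 0 l).map (fun p => c + p) := by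
  simpa using pvPrefixes_shift c l 0

theorem pvCutoff_map (n c : Int) (l : List Int) :
    pvCutoff n (l.map (fun p => c + p)) = pvCutoff (n - c) l := by
  induction l with
  | nil => simp [pvCutoff]
  | cons p r ih =>
    simp only [List.map_cons, pvCutoff, ih]
    by_cases h : c + p < n
    · rw [if_pos h, if_pos (by omega)]
    · rw [if_neg h, if_neg (by omega)]

theorem pvCutoff_le_length (n : Int) (l : List Int) : pvCutoff n l ≤ l.length := by
  induction l with
  | nil => simp [pvCutoff]
  | cons p r ih =>
    simp only [pvCutoff, List.length_cons]
    split <;> omega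

-- the whole-table cutoff splits off its head comparison when the head is exceeded
theorem pvCutoff_prefixes0_succ (m : Int) (l : List Int) (hm : 0 < m) :
    pvCutoff m (pvPrefixes 0 l) = pvCutoff m (pvPrefixes 0 l).tail + 1 := by
  cases l with
  | nil => simp only [pvPrefixes, pvCutoff, List.tail_cons]; rw [if_pos (by omega)]
  | cons a r => simp only [pvPrefixes, pvCutoff, List.tail_cons]; rw [if_pos (by omega)]

theorem pvGetD_map (c : Int) (l : List Int) :
    ∀ i : Nat, i < l.length → (l.map (fun p => c + p)).getD i 0 = c + l.getD i 0 := by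
  induction l with
  | nil => intro i hi; simp at hi
  | cons p r ih =>
    intro i hi
    cases i with
    | zero => simp
    | succ j =>
      simp only [List.map_cons, List.getD_cons_succ]
      exact ih j (by simpa using hi)

theorem pvGoA_eq_altG (l : List Int) :
    ∀ (w n acc : Int), pvGoA w n acc l = acc + pvAltG w n l := by
  induction l with
  | nil =>
    intro w n acc
    simp [pvGoA, pvAltG, pvPrefixes, pvCutoff, pvWsum]
  | cons a r ih =>
    intro w n acc
    have hc : pvPrefixes 0 (a :: r) = 0 :: pvPrefixes a r := by simp [pvPrefixes]
    have hshift : pvCutoff n (pvPrefixes a r) = pvCutoff (n - a) (pvPrefixes 0 r) := by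
      rw [pvPrefixes_shift0 a r, pvCutoff_map]
    have hlenp : (pvPrefixes 0 (a :: r)).length = r.length + 2 := by
      rw [pvPrefixes_length]; simp
    have hlenr : (pvPrefixes 0 r).length = r.length + 1 := pvPrefixes_length r 0
    by_cases hstop : n ≤ a
    · -- head bucket absorbs all remaining demand: A breaks, B's cutoff is t = 1
      have hmin : min n a = n := min_eq_left hstop
      have hk0 : pvCutoff n (pvPrefixes a r) = 0 := by
        cases r with
        | nil => simp only [pvPrefixes, pvCutoff]; rw [if_neg (by omega)]
        | cons b s => simp only [pvPrefixes, pvCutoff]; rw [if_neg (by omega)]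
      rw [pvAltG]
      simp only [hc, List.tail_cons, hk0]
      have hlen2 : (0 :: pvPrefixes a r).length = r.length + 2 := by
        simp [pvPrefixes_length]
      rw [if_neg (by rw [hlen2]; omega)]
      simp [pvGoA, pvWsum, hmin]
    · -- a < n: the head bucket is fully allocated and A keeps looping
      have halt : a < n := by omega
      have hmin : min n a = a := min_eq_right (by omega)
      have hne : ¬ (n - a = 0) := by omega
      have hA : pvGoA w n acc (a :: r) = pvGoA (w + 1) (n - a) (acc + w * a) r := by
        simp [pvGoA, hmin, hne]
      have hsplit : pvCutoff (n - a) (pvPrefixes 0 r) =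
          pvCutoff (n - a) (pvPrefixes 0 r).tail + 1 :=
        pvCutoff_prefixes0_succ (n - a) r (by omega)
      -- B's parent cutoff is the child's cutoff plus one
      have htp : pvCutoff n (pvPrefixes 0 (a :: r)).tail =
          pvCutoff (n - a) (pvPrefixes 0 r).tail + 1 := by
        rw [hc, List.tail_cons, hshift, hsplit]
      rw [hA, ih (w + 1) (n - a) (acc + w * a), pvAltG, pvAltG, htp, hlenp, hlenr]
      by_cases hend : 1 + pvCutoff (n - a) (pvPrefixes 0 r).tail = r.length + 1
      · -- the demand is never met: both sides give the full weighted sum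
        rw [if_pos (by omega), if_pos (by omega)]
        simp [pvWsum]; ring
      · rw [if_neg (by omega), if_neg (by omega)]
        have hle : pvCutoff (n - a) (pvPrefixes 0 r).tail ≤ r.length := by
          have h1 := pvCutoff_le_length (n - a) (pvPrefixes 0 r).tail
          have h2 : (pvPrefixes 0 r).tail.length = r.length := by
            cases r <;> simp [pvPrefixes, pvPrefixes_length]
          omega
        obtain ⟨j, hj⟩ : ∃ j, pvCutoff (n - a) (pvPrefixes 0 r).tail = j :=
          ⟨_, rfl⟩
        rw [hj] at hle hend ⊢
        have hgd : (pvPrefixes 0 (a :: r)).getD (1 + (j + 1) - 1) 0 =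
            a + (pvPrefixes 0 r).getD (1 + j - 1) 0 := by
          rw [hc, show 1 + (j + 1) - 1 = (1 + j - 1) + 1 from by omega, List.getD_cons_succ]
          rw [pvPrefixes_shift0 a r]
          exact pvGetD_map a (pvPrefixes 0 r) (1 + j - 1) (by omega)
        rw [hgd]
        rw [show (a :: r).take (1 + (j + 1) - 1) = a :: r.take (1 + j - 1) from by
          rw [show 1 + (j + 1) - 1 = (1 + j - 1) + 1 from by omega]; simp]
        rw [pvWsum]
        push_cast
        ring

theorem pv_alt_eq_altG (n : Int) (info : List Int) : unhappiness_alt n info = pvAltG 0 n info := by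
  simp only [unhappiness_alt, pvAltG, zero_add, Nat.cast_add, Nat.cast_one]

-- ===== VERDICT (by name: the statement is the Claim_ definition above) =====
theorem unhappiness_spec : Claim_equal_unhappiness := by
  intro n info _
  unfold Spec_unhappiness
  rw [unhappiness, pvGoA_eq_altG info 0 n 0, zero_add, pv_alt_eq_altG]
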